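-- pv_equiv track=rewrite | github.com/phloids-code-forge/Babs | scripts/dropzone-watch.py | _classify_from_header
-- ===== SOURCE A (Python) =====
-- def _classify_from_header(header: dict) -> str | None:
--     """Return model type from safetensors metadata + tensor key patterns, or None."""
--     meta = header.get("__metadata__") or {}
--
--     # kohya-style LoRA training metadata
--     net_mod = meta.get("ss_network_module", "").lower()
--     if any(x in net_mod for x in ("lora", "locon", "loha", "lokr", "oft")):
--         return "loras"
--
--     # modelspec standard field
--     arch = meta.get("modelspec.architecture", "").lower()
--     if arch:
--         if "lora" in arch:
--             return "loras"
--         if "vae" in arch: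
--             return "vae"
--         if any(x in arch for x in ("flux", "wan", "ltx", "sd3", "sana", "aura", "hunyuan", "cogvideo", "mochi")):
--             return "diffusion_models"
--         if any(x in arch for x in ("stable-diffusion", "sdxl", "sd1", "sd2")):
--             return "checkpoints"
--
--     # Inspect tensor key names (sample up to 100)
--     tensor_keys = [k for k in header if k != "__metadata__"]
--     sample = tensor_keys[:100]
--     joined = " ".join(sample)
--
--     # LoRA tensors
--     if any(("lora_up" in k or "lora_down" in k or ".lora_A" in k or ".lora_B" in k) for k in sample):
--         return "loras"
--
--     # Flux: double_blocks / single_blocks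
--     if any(k.startswith(("double_blocks.", "single_blocks.", "img_in.", "txt_in.")) for k in sample):
--         return "diffusion_models"
--
--     # ControlNet
--     if any("zero_conv" in k for k in sample) and any("input_blocks" in k or "middle_block" in k for k in sample):
--         return "controlnet"
--
--     # SD checkpoint (UNet + optionally VAE embedded)
--     if any(k.startswith("model.diffusion_model.") for k in sample):
--         return "checkpoints"
--
--     # Standalone VAE (encoder + decoder, no UNet)
--     if any(k.startswith("encoder.") for k in sample) and any(k.startswith("decoder.") for k in sample):
--         if not any(k.startswith("model.diffusion_model.") for k in sample):
--             return "vae"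
--
--     # CLIP / text encoder
--     if any(k.startswith("text_model.") for k in sample):
--         return "text_encoders"
--
--     # T5-style encoder
--     if any(k.startswith("encoder.block.") for k in sample):
--         return "text_encoders"
--
--     # CLIP vision (no text side)
--     if any(k.startswith("vision_model.") for k in sample) and "text_model" not in joined:
--         return "clip_vision"
--
--     # IP-Adapter
--     if any("image_proj" in k for k in sample) and any("ip_adapter" in k or "to_k_ip" in k for k in sample):
--         return "ipadapter"
--
--     return None
-- ===== SOURCE B (Python) =====
-- def _classify_from_header(header: dict) -> str | None:
--     """Return model type from safetensors metadata + tensor key patterns, or None."""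
--     meta = header.get("__metadata__") or {}
--
--     # kohya-style LoRA training metadata
--     net_mod = meta.get("ss_network_module", "").lower()
--     if any(x in net_mod for x in ("lora", "locon", "loha", "lokr", "oft")):
--         return "loras"
--
--     # modelspec standard field: table-driven ordered lookup
--     arch = meta.get("modelspec.architecture", "").lower()
--     if arch:
--         for subs, label in (
--             (("lora",), "loras"),
--             (("vae",), "vae"),
--             (("flux", "wan", "ltx", "sd3", "sana", "aura", "hunyuan", "cogvideo", "mochi"), "diffusion_models"),
--             (("stable-diffusion", "sdxl", "sd1", "sd2"), "checkpoints"),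
--         ):
--             if any(s in arch for s in subs):
--                 return label
--
--     # ONE pass over the key sample, collecting every feature the rules need
--     sample = [k for k in header if k != "__metadata__"][:100]
--     lora = flux = zc = iomb = unet = enc = dec = txtm = encblk = vis = tm = imgp = ipad = False
--     for k in sample:
--         lora = lora or "lora_up" in k or "lora_down" in k or ".lora_A" in k or ".lora_B" in k
--         flux = flux or k.startswith(("double_blocks.", "single_blocks.", "img_in.", "txt_in."))
--         zc = zc or "zero_conv" in k
--         iomb = iomb or "input_blocks" in k or "middle_block" in k
--         unet = unet or k.startswith("model.diffusion_model.")
--         enc = enc or k.startswith("encoder.")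
--         dec = dec or k.startswith("decoder.")
--         txtm = txtm or k.startswith("text_model.")
--         encblk = encblk or k.startswith("encoder.block.")
--         vis = vis or k.startswith("vision_model.")
--         tm = tm or "text_model" in k
--         imgp = imgp or "image_proj" in k
--         ipad = ipad or "ip_adapter" in k or "to_k_ip" in k
--
--     if lora:
--         return "loras"
--     if flux:
--         return "diffusion_models"
--     if zc and iomb:
--         return "controlnet"
--     if unet:
--         return "checkpoints"
--     if enc and dec:
--         return "vae"
--     if txtm or encblk:
--         return "text_encoders"
--     if vis and not tm:
--         return "clip_vision"
--     if imgp and ipad: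
--         return "ipadapter"
--     return None
-- ===== Notes on version B (the rewrite author's own statement) =====
-- stated objective: alternative
-- what changed: B replaces A's dozen separate any()-scans over the tensor-key sample with a single feature-collecting pass that accumulates all boolean flags (including the 'text_model' substring fact, dropping the joined string entirely) and a table-driven loop for the modelspec.architecture cascade; the rule order is then applied to the precomputed flags.
import Mathlib
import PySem

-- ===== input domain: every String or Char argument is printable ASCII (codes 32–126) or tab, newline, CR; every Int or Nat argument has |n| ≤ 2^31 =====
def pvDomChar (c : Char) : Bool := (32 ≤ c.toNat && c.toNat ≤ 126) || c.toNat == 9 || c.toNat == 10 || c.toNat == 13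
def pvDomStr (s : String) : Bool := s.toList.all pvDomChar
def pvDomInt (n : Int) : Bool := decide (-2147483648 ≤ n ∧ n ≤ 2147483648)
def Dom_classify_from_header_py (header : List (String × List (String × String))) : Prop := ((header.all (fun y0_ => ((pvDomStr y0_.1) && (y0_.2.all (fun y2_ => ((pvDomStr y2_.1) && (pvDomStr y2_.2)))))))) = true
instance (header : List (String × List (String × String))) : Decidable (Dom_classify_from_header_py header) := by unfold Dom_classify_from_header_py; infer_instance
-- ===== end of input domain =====

-- B replaces A's ~dozen separate scans over the key sample by ONE feature-collecting pass
-- (a fold over a record of boolean flags) plus a table-driven arch lookup; objective: alternative decomposition.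

-- ===== PORT A =====
-- the tensor-key section of A (everything after the metadata checks), ported step for step
def pvKeysClassify (header : List (String × List (String × String))) : Option String :=
  let tensor_keys := (header.map Prod.fst).filter (fun k => k ≠ "__metadata__")
  let sample := PySem.List.slice tensor_keys none (some 100)
  let joined := PySem.Str.join " " sample
  if sample.any (fun k => PySem.Str.isIn "lora_up" k || PySem.Str.isIn "lora_down" k || PySem.Str.isIn ".lora_A" k || PySem.Str.isIn ".lora_B" k) then some "loras"
  else if sample.any (fun k => ["double_blocks.", "single_blocks.", "img_in.", "txt_in."].any (fun p => PySem.Str.startswith k p)) then some "diffusion_models"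
  else if (sample.any (fun k => PySem.Str.isIn "zero_conv" k)) && (sample.any (fun k => PySem.Str.isIn "input_blocks" k || PySem.Str.isIn "middle_block" k)) then some "controlnet"
  else if sample.any (fun k => PySem.Str.startswith k "model.diffusion_model.") then some "checkpoints"
  else if (sample.any (fun k => PySem.Str.startswith k "encoder.")) && (sample.any (fun k => PySem.Str.startswith k "decoder.")) && !(sample.any (fun k => PySem.Str.startswith k "model.diffusion_model.")) then some "vae"
  else if sample.any (fun k => PySem.Str.startswith k "text_model.") then some "text_encoders"
  else if sample.any (fun k => PySem.Str.startswith k "encoder.block.") then some "text_encoders"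
  else if (sample.any (fun k => PySem.Str.startswith k "vision_model.")) && !(PySem.Str.isIn "text_model" joined) then some "clip_vision"
  else if (sample.any (fun k => PySem.Str.isIn "image_proj" k)) && (sample.any (fun k => PySem.Str.isIn "ip_adapter" k || PySem.Str.isIn "to_k_ip" k)) then some "ipadapter"
  else none

def classify_from_header_py (header : List (String × List (String × String))) : Option String :=
  let meta_ : PySem.Dict String String :=
    PySem.Dict.mk (((PySem.Dict.mk header).get? "__metadata__").getD [])
  let net_mod := PySem.Str.lower (meta_.getD "ss_network_module" "")
  if ["lora", "locon", "loha", "lokr", "oft"].any (fun x => PySem.Str.isIn x net_mod) then some "loras"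
  else
    let arch := PySem.Str.lower (meta_.getD "modelspec.architecture" "")
    if arch ≠ "" then
      if PySem.Str.isIn "lora" arch then some "loras"
      else if PySem.Str.isIn "vae" arch then some "vae"
      else if ["flux", "wan", "ltx", "sd3", "sana", "aura", "hunyuan", "cogvideo", "mochi"].any (fun x => PySem.Str.isIn x arch) then some "diffusion_models"
      else if ["stable-diffusion", "sdxl", "sd1", "sd2"].any (fun x => PySem.Str.isIn x arch) then some "checkpoints"
      else pvKeysClassify header
    else pvKeysClassify header

-- ===== PORT B =====
structure PvFlags where
  lora : Bool
  flux : Bool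
  zc : Bool
  iomb : Bool
  unet : Bool
  enc : Bool
  dec : Bool
  txtm : Bool
  encblk : Bool
  vis : Bool
  tm : Bool
  imgp : Bool
  ipad : Bool
deriving Repr, DecidableEq

def pvFlagsInit : PvFlags :=
  ⟨false, false, false, false, false, false, false, false, false, false, false, false, false⟩

-- one iteration of B's single feature-collecting pass
def pvFlagsStep (f : PvFlags) (k : String) : PvFlags :=
  { lora := f.lora || (PySem.Str.isIn "lora_up" k || PySem.Str.isIn "lora_down" k || PySem.Str.isIn ".lora_A" k || PySem.Str.isIn ".lora_B" k)
    flux := f.flux || (["double_blocks.", "single_blocks.", "img_in.", "txt_in."].any (fun p => PySem.Str.startswith k p))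
    zc := f.zc || (PySem.Str.isIn "zero_conv" k)
    iomb := f.iomb || (PySem.Str.isIn "input_blocks" k || PySem.Str.isIn "middle_block" k)
    unet := f.unet || (PySem.Str.startswith k "model.diffusion_model.")
    enc := f.enc || (PySem.Str.startswith k "encoder.")
    dec := f.dec || (PySem.Str.startswith k "decoder.")
    txtm := f.txtm || (PySem.Str.startswith k "text_model.")
    encblk := f.encblk || (PySem.Str.startswith k "encoder.block.")
    vis := f.vis || (PySem.Str.startswith k "vision_model.")
    tm := f.tm || (PySem.Str.isIn "text_model" k)
    imgp := f.imgp || (PySem.Str.isIn "image_proj" k)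
    ipad := f.ipad || (PySem.Str.isIn "ip_adapter" k || PySem.Str.isIn "to_k_ip" k) }

def pvArchTable : List (List String × String) :=
  [(["lora"], "loras"),
   (["vae"], "vae"),
   (["flux", "wan", "ltx", "sd3", "sana", "aura", "hunyuan", "cogvideo", "mochi"], "diffusion_models"),
   (["stable-diffusion", "sdxl", "sd1", "sd2"], "checkpoints")]

def pvArchLookup (arch : String) : List (List String × String) → Option String
  | [] => none
  | (subs, label) :: rest =>
      if subs.any (fun s => PySem.Str.isIn s arch) then some label else pvArchLookup arch rest

-- the flag cascade of B (everything after the single pass)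
def pvAltKeys (header : List (String × List (String × String))) : Option String :=
  let sample := PySem.List.slice ((header.map Prod.fst).filter (fun k => k ≠ "__metadata__")) none (some 100)
  let f := sample.foldl pvFlagsStep pvFlagsInit
  if f.lora then some "loras"
  else if f.flux then some "diffusion_models"
  else if f.zc && f.iomb then some "controlnet"
  else if f.unet then some "checkpoints"
  else if f.enc && f.dec then some "vae"
  else if f.txtm || f.encblk then some "text_encoders"
  else if f.vis && !f.tm then some "clip_vision"
  else if f.imgp && f.ipad then some "ipadapter"
  else none

def classify_from_header_py_alt (header : List (String × List (String × String))) : Option String :=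
  let meta_ : PySem.Dict String String :=
    PySem.Dict.mk (((PySem.Dict.mk header).get? "__metadata__").getD [])
  let net_mod := PySem.Str.lower (meta_.getD "ss_network_module" "")
  if ["lora", "locon", "loha", "lokr", "oft"].any (fun x => PySem.Str.isIn x net_mod) then some "loras"
  else
    let arch := PySem.Str.lower (meta_.getD "modelspec.architecture" "")
    match (if arch ≠ "" then pvArchLookup arch pvArchTable else none) with
    | some label => some label
    | none => pvAltKeys header

-- ===== PRECONDITION & SPEC =====
def Spec_classify_from_header_py (header : List (String × List (String × String))) (out : Option String) : Prop := out = classify_from_header_py_alt header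
instance (header : List (String × List (String × String))) (out : Option String) : Decidable (Spec_classify_from_header_py header out) := by unfold Spec_classify_from_header_py; infer_instance

-- ===== CLAIM (what is proved, stated in full; the proofs are below) =====
def Claim_equal_classify_from_header_py : Prop := ∀ (header : List (String × List (String × String))), Dom_classify_from_header_py header → Spec_classify_from_header_py header (classify_from_header_py header)

-- ===== LEMMAS AND PROOFS =====

-- the fold of B's single pass computes exactly the 13 'any' scans of A
theorem pvFlags_foldl (l : List String) (f0 : PvFlags) :
    l.foldl pvFlagsStep f0 =
      ⟨f0.lora || l.any (fun k => PySem.Str.isIn "lora_up" k || PySem.Str.isIn "lora_down" k || PySem.Str.isIn ".lora_A" k || PySem.Str.isIn ".lora_B" k),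
       f0.flux || l.any (fun k => ["double_blocks.", "single_blocks.", "img_in.", "txt_in."].any (fun p => PySem.Str.startswith k p)),
       f0.zc || l.any (fun k => PySem.Str.isIn "zero_conv" k),
       f0.iomb || l.any (fun k => PySem.Str.isIn "input_blocks" k || PySem.Str.isIn "middle_block" k),
       f0.unet || l.any (fun k => PySem.Str.startswith k "model.diffusion_model."),
       f0.enc || l.any (fun k => PySem.Str.startswith k "encoder."),
       f0.dec || l.any (fun k => PySem.Str.startswith k "decoder."),
       f0.txtm || l.any (fun k => PySem.Str.startswith k "text_model."),
       f0.encblk || l.any (fun k => PySem.Str.startswith k "encoder.block."),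
       f0.vis || l.any (fun k => PySem.Str.startswith k "vision_model."),
       f0.tm || l.any (fun k => PySem.Str.isIn "text_model" k),
       f0.imgp || l.any (fun k => PySem.Str.isIn "image_proj" k),
       f0.ipad || l.any (fun k => PySem.Str.isIn "ip_adapter" k || PySem.Str.isIn "to_k_ip" k)⟩ := by
  induction l generalizing f0 with
  | nil => simp
  | cons k l ih =>
      simp only [List.foldl_cons, ih, pvFlagsStep, List.any_cons, Bool.or_assoc]

-- a prefix not containing c of 'x ++ c :: y' is a prefix of x
theorem pv_prefix_append_cons {α : Type} {sub x y : List α} {c : α}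
    (h : c ∉ sub) (hp : sub <+: x ++ c :: y) : sub <+: x := by
  by_cases hl : sub.length ≤ x.length
  · have := List.prefix_take_iff.mpr ⟨hp, by simpa using hl⟩
    simpa [List.take_append_of_le_length hl] using this
  · exfalso
    have hlt : x.length < sub.length := Nat.lt_of_not_le hl
    have hg : sub[x.length] = (x ++ c :: y)[x.length]'(by simp) := hp.getElem hlt
    have hc : sub[x.length] = c := by
      simpa [List.getElem_append_right (Nat.le_refl x.length)] using hg
    exact h (hc ▸ List.getElem_mem hlt)

theorem pv_infix_append_cons {α : Type} {sub : List α} {c : α}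
    (h : c ∉ sub) (x y : List α) :
    sub <:+: (x ++ c :: y) ↔ sub <:+: x ∨ sub <:+: y := by
  induction x with
  | nil =>
      simp only [List.nil_append, List.infix_cons_iff, List.infix_nil]
      constructor
      · rintro (hp | hi)
        · rcases sub with _ | ⟨a, sub⟩
          · exact Or.inl rfl
          · obtain ⟨t, ht⟩ := hp
            rw [List.cons_append] at ht
            injection ht with h1 _
            exact absurd (h1 ▸ List.mem_cons_self) h
        · exact Or.inr hi
      · rintro (rfl | hy)
        · exact Or.inl List.nil_prefix
        · exact Or.inr hy
  | cons a x ih =>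
      rw [List.cons_append, List.infix_cons_iff, ih, List.infix_cons_iff]
      constructor
      · rintro (hp | hx | hy)
        · exact Or.inl (Or.inl (pv_prefix_append_cons h (by simpa using hp)))
        · exact Or.inl (Or.inr hx)
        · exact Or.inr hy
      · rintro ((hp | hx) | hy)
        · exact Or.inl (by simpa using hp.trans (List.prefix_append (a :: x) (c :: y)))
        · exact Or.inr (Or.inl hx)
        · exact Or.inr (Or.inr hy)

theorem pv_infix_intercalate {sub : List Char} (h : ' ' ∉ sub) (hne : sub ≠ [])
    (ps : List (List Char)) :
    sub <:+: [' '].intercalate ps ↔ ∃ p ∈ ps, sub <:+: p := by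
  induction ps with
  | nil => simp [List.intercalate, List.infix_nil, hne]
  | cons p rest ih =>
      rcases rest with _ | ⟨q, rest⟩
      · simp [List.intercalate]
      · rw [show [' '].intercalate (p :: q :: rest) = p ++ ' ' :: [' '].intercalate (q :: rest) from by
              simp [List.intercalate, List.intersperse],
            pv_infix_append_cons h, ih]
        simp only [List.mem_cons]
        constructor
        · rintro (hp | ⟨r, hr, hir⟩)
          · exact ⟨p, Or.inl rfl, hp⟩
          · exact ⟨r, Or.inr hr, hir⟩
        · rintro ⟨r, (rfl | hr), hir⟩
          · exact Or.inl hir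
          · exact Or.inr ⟨r, hr, hir⟩

-- A's '"text_model" in joined' equals B's per-key flag
theorem pv_joined_any (sample : List String) :
    PySem.Str.isIn "text_model" (PySem.Str.join " " sample) =
      sample.any (fun k => PySem.Str.isIn "text_model" k) := by
  rw [Bool.eq_iff_iff]
  simp only [PySem.Str.isIn_iff_infix, List.any_eq_true, PySem.Str.join]
  have hsp : ' ' ∉ "text_model".toList := by decide
  have hne : "text_model".toList ≠ [] := by decide
  rw [show (String.ofList (PySem.Chars.join " ".toList (sample.map String.toList))).toList
        = [' '].intercalate (sample.map String.toList) from by simp [PySem.Chars.join]]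
  rw [pv_infix_intercalate hsp hne]
  constructor
  · rintro ⟨p, hp, hi⟩
    rcases List.mem_map.mp hp with ⟨k, hk, rfl⟩
    exact ⟨k, hk, hi⟩
  · rintro ⟨k, hk, hi⟩
    exact ⟨k.toList, List.mem_map.mpr ⟨k, hk, rfl⟩, hi⟩

-- A's tensor-key cascade equals B's flag cascade
theorem pv_keys_eq (header : List (String × List (String × String))) :
    pvKeysClassify header = pvAltKeys header := by
  simp only [pvKeysClassify, pvAltKeys]
  rw [pvFlags_foldl, pv_joined_any]
  simp only [pvFlagsInit, Bool.false_or]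
  generalize (PySem.List.slice ((header.map Prod.fst).filter (fun k => k ≠ "__metadata__")) none (some 100)).any
      (fun k => PySem.Str.isIn "lora_up" k || PySem.Str.isIn "lora_down" k || PySem.Str.isIn ".lora_A" k || PySem.Str.isIn ".lora_B" k) = b1
  generalize (PySem.List.slice ((header.map Prod.fst).filter (fun k => k ≠ "__metadata__")) none (some 100)).any
      (fun k => ["double_blocks.", "single_blocks.", "img_in.", "txt_in."].any (fun p => PySem.Str.startswith k p)) = b2
  generalize (PySem.List.slice ((header.map Prod.fst).filter (fun k => k ≠ "__metadata__")) none (some 100)).any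
      (fun k => PySem.Str.isIn "zero_conv" k) = b3
  generalize (PySem.List.slice ((header.map Prod.fst).filter (fun k => k ≠ "__metadata__")) none (some 100)).any
      (fun k => PySem.Str.isIn "input_blocks" k || PySem.Str.isIn "middle_block" k) = b4
  generalize (PySem.List.slice ((header.map Prod.fst).filter (fun k => k ≠ "__metadata__")) none (some 100)).any
      (fun k => PySem.Str.startswith k "model.diffusion_model.") = b5
  generalize (PySem.List.slice ((header.map Prod.fst).filter (fun k => k ≠ "__metadata__")) none (some 100)).any
      (fun k => PySem.Str.startswith k "encoder.") = b6
  generalize (PySem.List.slice ((header.map Prod.fst).filter (fun k => k ≠ "__metadata__")) none (some 100)).any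
      (fun k => PySem.Str.startswith k "decoder.") = b7
  generalize (PySem.List.slice ((header.map Prod.fst).filter (fun k => k ≠ "__metadata__")) none (some 100)).any
      (fun k => PySem.Str.startswith k "text_model.") = b8
  generalize (PySem.List.slice ((header.map Prod.fst).filter (fun k => k ≠ "__metadata__")) none (some 100)).any
      (fun k => PySem.Str.startswith k "encoder.block.") = b9
  generalize (PySem.List.slice ((header.map Prod.fst).filter (fun k => k ≠ "__metadata__")) none (some 100)).any
      (fun k => PySem.Str.startswith k "vision_model.") = b10
  generalize (PySem.List.slice ((header.map Prod.fst).filter (fun k => k ≠ "__metadata__")) none (some 100)).any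
      (fun k => PySem.Str.isIn "text_model" k) = b11
  generalize (PySem.List.slice ((header.map Prod.fst).filter (fun k => k ≠ "__metadata__")) none (some 100)).any
      (fun k => PySem.Str.isIn "image_proj" k) = b12
  generalize (PySem.List.slice ((header.map Prod.fst).filter (fun k => k ≠ "__metadata__")) none (some 100)).any
      (fun k => PySem.Str.isIn "ip_adapter" k || PySem.Str.isIn "to_k_ip" k) = b13
  revert b1 b2 b3 b4 b5 b6 b7 b8 b9 b10 b11 b12 b13
  decide

-- ===== VERDICT (by name: the statement is the Claim_ definition above) =====
theorem classify_from_header_py_spec : Claim_equal_classify_from_header_py := by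
  intro header _
  unfold Spec_classify_from_header_py classify_from_header_py classify_from_header_py_alt
  simp only [pvArchTable, pvArchLookup, List.any_cons, List.any_nil, Bool.or_false, pv_keys_eq]
  split_ifs <;> rfl
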